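-- pv_equiv track=rewrite | github.com/yei-pi/image-processing-unit2 | pure_python_filters.py | sobel_filter_python
-- ===== SOURCE A (Python) =====
-- import math
--
-- def _pad_image_zero(image, pad=1):
--     """
--     Agrega padding de ceros alrededor de la imagen.
--
--     Parámetros:
--         image (list[list[int]]): imagen como lista de listas
--         pad (int): grosor del padding
--
--     Retorna:
--         list[list[int]]: imagen con padding
--     """
--     h = len(image)
--     w = len(image[0])
--
--     padded = [[0 for _ in range(w + 2 * pad)] for _ in range(h + 2 * pad)]
--
--     for i in range(h):
--         for j in range(w):
--             padded[i + pad][j + pad] = int(image[i][j])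
--
--     return padded
--
-- def sobel_filter_python(image):
--     """
--     Aplica filtro Sobel usando Python puro.
--
--     Calcula gradiente en X y Y, luego combina:
--         magnitud = sqrt(gx^2 + gy^2)
--     """
--     gx_kernel = [
--         [-1, 0, 1],
--         [-2, 0, 2],
--         [-1, 0, 1],
--     ]
--
--     gy_kernel = [
--         [-1, -2, -1],
--         [0, 0, 0],
--         [1, 2, 1],
--     ]
--
--     h = len(image)
--     w = len(image[0])
--
--     padded = _pad_image_zero(image, 1)
--     out = [[0 for _ in range(w)] for _ in range(h)]
--
--     for i in range(h):
--         for j in range(w):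
--             gx = 0
--             gy = 0
--
--             for ki in range(3):
--                 for kj in range(3):
--                     pixel = padded[i + ki][j + kj]
--                     gx += pixel * gx_kernel[ki][kj]
--                     gy += pixel * gy_kernel[ki][kj]
--
--             mag = math.sqrt(gx * gx + gy * gy)
--             mag = int(max(0, min(255, mag)))
--             out[i][j] = mag
--
--     return out
-- ===== SOURCE B (Python) =====
-- import math
--
-- def sobel_filter_python(image):
--     """Separable Sobel: one horizontal 1D pass per row ([-1,0,1] derivative and
--     [1,2,1] smooth over the zero-padded row), then a vertical 1D combine; exact
--     integer arithmetic with math.isqrt replacing the float sqrt/clamp/int."""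
--     h = len(image)
--     w = len(image[0])
--
--     # horizontal pass (zero padding at the row ends)
--     rx = [[(row[j + 1] if j + 1 < w else 0) - (row[j - 1] if j >= 1 else 0)
--            for j in range(w)] for row in image]
--     sx = [[(row[j - 1] if j >= 1 else 0) + 2 * row[j] + (row[j + 1] if j + 1 < w else 0)
--            for j in range(w)] for row in image]
--
--     zero = [0] * w
--     out = []
--     for i in range(h):
--         up_r = rx[i - 1] if i >= 1 else zero
--         dn_r = rx[i + 1] if i + 1 < h else zero
--         up_s = sx[i - 1] if i >= 1 else zero
--         dn_s = sx[i + 1] if i + 1 < h else zero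
--         row_out = []
--         for j in range(w):
--             gx = up_r[j] + 2 * rx[i][j] + dn_r[j]
--             gy = dn_s[j] - up_s[j]
--             row_out.append(min(255, math.isqrt(gx * gx + gy * gy)))
--         out.append(row_out)
--     return out
-- ===== Notes on version B (the rewrite author's own statement) =====
-- stated objective: faster
-- what changed: Replaces the per-pixel 3x3 double kernel loop over an explicitly built zero-padded copy by two separable 1D passes (a horizontal [-1,0,1] derivative and [1,2,1] smooth per row, then a vertical combine), and replaces float math.sqrt+clamp+int by the exact integer math.isqrt.
import Mathlib
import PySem

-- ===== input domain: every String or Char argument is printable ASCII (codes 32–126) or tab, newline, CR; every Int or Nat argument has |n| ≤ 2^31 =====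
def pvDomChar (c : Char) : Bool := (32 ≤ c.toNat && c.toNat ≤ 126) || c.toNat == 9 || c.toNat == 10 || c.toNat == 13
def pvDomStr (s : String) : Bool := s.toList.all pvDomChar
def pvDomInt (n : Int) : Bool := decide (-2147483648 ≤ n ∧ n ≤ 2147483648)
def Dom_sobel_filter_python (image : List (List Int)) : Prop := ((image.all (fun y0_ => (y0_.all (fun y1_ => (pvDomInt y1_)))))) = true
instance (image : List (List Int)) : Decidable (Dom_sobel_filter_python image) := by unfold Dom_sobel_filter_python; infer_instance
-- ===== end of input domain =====

-- B replaces A's per-pixel 3x3 double kernel loop by two separable 1D passes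
-- (horizontal [-1,0,1]/[1,2,1] per row, then a vertical combine); objective: alternative decomposition.
-- math.sqrt / int / clamp in A and math.isqrt in B are both ported as
-- min 255 (Nat.sqrt …): exact here, since int(max(0,min(255,math.sqrt(g)))) = min(255, isqrt(g))
-- for every nonnegative integer g (exact floats below 2^52, and monotonicity beyond the 255 clamp).

-- ===== PORT A =====
-- _pad_image_zero: zero grid of size (h+2)x(w+2) whose interior cell (i,j) holds image[i-1][j-1]
-- (each interior cell is written exactly once by the fill loop; expressed cell-wise here).
def pvPadA (image : List (List Int)) : List (List Int) :=
  let h := image.length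
  let w := (image.headD []).length
  (List.range (h + 2)).map fun i => (List.range (w + 2)).map fun j =>
    if 1 ≤ i ∧ i ≤ h ∧ 1 ≤ j ∧ j ≤ w then (image.getD (i - 1) []).getD (j - 1) 0 else 0

def sobel_filter_python (image : List (List Int)) : List (List Int) :=
  let gxk : List (List Int) := [[-1, 0, 1], [-2, 0, 2], [-1, 0, 1]]
  let gyk : List (List Int) := [[-1, -2, -1], [0, 0, 0], [1, 2, 1]]
  let h := image.length
  let w := (image.headD []).length
  let padded := pvPadA image
  (List.range h).map fun i => (List.range w).map fun j =>
    let s := (List.range 3).foldl (fun (s : Int × Int) ki =>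
      (List.range 3).foldl (fun (s : Int × Int) kj =>
        let pixel := (padded.getD (i + ki) []).getD (j + kj) 0
        (s.1 + pixel * ((gxk.getD ki []).getD kj 0),
         s.2 + pixel * ((gyk.getD ki []).getD kj 0))) s) ((0 : Int), (0 : Int))
    -- mag = int(max(0, min(255, math.sqrt(gx*gx+gy*gy)))); exact as floor of the real sqrt here
    max 0 (min 255 (Int.ofNat (Nat.sqrt (s.1 * s.1 + s.2 * s.2).toNat)))

-- ===== PORT B =====
def sobel_filter_python_alt (image : List (List Int)) : List (List Int) :=
  let h := image.length
  let w := (image.headD []).length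
  let rx := image.map fun row => (List.range w).map fun j =>
    (if j + 1 < w then row.getD (j + 1) 0 else 0) - (if 1 ≤ j then row.getD (j - 1) 0 else 0)
  let sx := image.map fun row => (List.range w).map fun j =>
    (if 1 ≤ j then row.getD (j - 1) 0 else 0) + 2 * row.getD j 0 +
      (if j + 1 < w then row.getD (j + 1) 0 else 0)
  let zero := List.replicate w (0 : Int)
  (List.range h).map fun i =>
    let upR := if 1 ≤ i then rx.getD (i - 1) zero else zero
    let dnR := if i + 1 < h then rx.getD (i + 1) zero else zero
    let upS := if 1 ≤ i then sx.getD (i - 1) zero else zero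
    let dnS := if i + 1 < h then sx.getD (i + 1) zero else zero
    (List.range w).map fun j =>
      let gx := upR.getD j 0 + 2 * ((rx.getD i zero).getD j 0) + dnR.getD j 0
      let gy := dnS.getD j 0 - upS.getD j 0
      min 255 (Int.ofNat (Nat.sqrt (gx * gx + gy * gy).toNat))

-- ===== PRECONDITION & SPEC =====
-- Pre_ = exactly where Python A returns: A raises IndexError on an empty image
-- and when some row is shorter than the first row (B raises on the same inputs).
def Pre_sobel_filter_python (image : List (List Int)) : Prop :=
  image ≠ [] ∧ ∀ row ∈ image, (image.headD []).length ≤ row.length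
instance (image : List (List Int)) : Decidable (Pre_sobel_filter_python image) := by
  unfold Pre_sobel_filter_python; infer_instance
def pvWitness_sobel_filter_python : List (List Int) := [[1, 2], [3, 4]]

def Spec_sobel_filter_python (image : List (List Int)) (out : List (List Int)) : Prop := out = sobel_filter_python_alt image
instance (image : List (List Int)) (out : List (List Int)) : Decidable (Spec_sobel_filter_python image out) := by unfold Spec_sobel_filter_python; infer_instance

-- ===== CLAIM (what is proved, stated in full; the proofs are below) =====
def Claim_equal_sobel_filter_python : Prop := ∀ (image : List (List Int)), Dom_sobel_filter_python image → Pre_sobel_filter_python image → Spec_sobel_filter_python image (sobel_filter_python image)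

-- ===== LEMMAS AND PROOFS =====

-- getD of a map over List.range, index in range
theorem pv_getD_map_range {α : Type} (g : Nat → α) (n k : Nat) (d : α) (hk : k < n) :
    (((List.range n).map g).getD k d) = g k := by
  simp [List.getD_eq_getElem?_getD, hk]

theorem pv_getD_map_list {α β : Type} (g : α → β) (xs : List α) (k : Nat) (d : β) (d' : α)
    (hk : k < xs.length) : ((xs.map g).getD k d) = g (xs.getD k d') := by
  simp [List.getD_eq_getElem?_getD, List.getElem?_map, List.getElem?_eq_getElem hk]

-- total accessor for A's zero-padded grid: cell (r,c) of the padded image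
def pvCell (image : List (List Int)) (w r c : Nat) : Int :=
  if 1 ≤ r ∧ r ≤ image.length ∧ 1 ≤ c ∧ c ≤ w then (image.getD (r - 1) []).getD (c - 1) 0 else 0

theorem pv_pad_cell (image : List (List Int)) (w r c : Nat)
    (hr : r < image.length + 2) (hc : c < w + 2) :
    (((List.range (image.length + 2)).map fun i => (List.range (w + 2)).map fun j =>
        if 1 ≤ i ∧ i ≤ image.length ∧ 1 ≤ j ∧ j ≤ w
          then (image.getD (i - 1) []).getD (j - 1) 0 else 0).getD r []).getD c 0 =
    pvCell image w r c := by
  rw [pv_getD_map_range _ _ _ _ hr, pv_getD_map_range _ _ _ _ hc, pvCell]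

-- B's rx row k, column j, as padded cells
theorem pv_rx_cell (image : List (List Int)) (w j k : Nat) (hj : j < w) (hk : k < image.length) :
    (((image.map fun row => (List.range w).map fun j' =>
        (if j' + 1 < w then row.getD (j' + 1) 0 else 0) -
          (if 1 ≤ j' then row.getD (j' - 1) 0 else 0)).getD k (List.replicate w 0)).getD j 0) =
    pvCell image w (k + 1) (j + 2) - pvCell image w (k + 1) j := by
  rw [pv_getD_map_list _ _ _ _ [] hk, pv_getD_map_range _ _ _ _ hj]
  unfold pvCell
  simp only [show k + 1 - 1 = k from rfl, show j + 2 - 1 = j + 1 from rfl]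
  split_ifs <;> first | rfl | omega

-- B's sx row k, column j, as padded cells
theorem pv_sx_cell (image : List (List Int)) (w j k : Nat) (hj : j < w) (hk : k < image.length) :
    (((image.map fun row => (List.range w).map fun j' =>
        (if 1 ≤ j' then row.getD (j' - 1) 0 else 0) + 2 * row.getD j' 0 +
          (if j' + 1 < w then row.getD (j' + 1) 0 else 0)).getD k (List.replicate w 0)).getD j 0) =
    pvCell image w (k + 1) j + 2 * pvCell image w (k + 1) (j + 1) + pvCell image w (k + 1) (j + 2) := by
  rw [pv_getD_map_list _ _ _ _ [] hk, pv_getD_map_range _ _ _ _ hj]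
  unfold pvCell
  simp only [show k + 1 - 1 = k from rfl, show j + 2 - 1 = j + 1 from rfl]
  split_ifs <;> first | rfl | omega

theorem pv_cell_row_zero (image : List (List Int)) (w c : Nat) : pvCell image w 0 c = 0 := by
  simp [pvCell]

theorem pv_cell_row_big (image : List (List Int)) (w r c : Nat) (hr : image.length < r) :
    pvCell image w r c = 0 := by
  unfold pvCell
  rw [if_neg (by omega)]

set_option maxHeartbeats 2000000 in
-- the two ports agree on every input (Pre_ only marks where Python A returns at all)
theorem pv_ports_eq (image : List (List Int)) :
    sobel_filter_python image = sobel_filter_python_alt image := by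
  unfold sobel_filter_python sobel_filter_python_alt pvPadA
  apply List.map_congr_left
  intro i hi
  rw [List.mem_range] at hi
  apply List.map_congr_left
  intro j hj
  rw [List.mem_range] at hj
  have hr3 : List.range 3 = [0, 1, 2] := by decide
  rw [hr3]
  simp only [List.foldl, Nat.add_zero]
  -- replace the nine padded-grid reads by pvCell atoms
  rw [pv_pad_cell image _ i j (by omega) (by omega),
    pv_pad_cell image _ i (j + 1) (by omega) (by omega),
    pv_pad_cell image _ i (j + 2) (by omega) (by omega),
    pv_pad_cell image _ (i + 1) j (by omega) (by omega),
    pv_pad_cell image _ (i + 1) (j + 1) (by omega) (by omega),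
    pv_pad_cell image _ (i + 1) (j + 2) (by omega) (by omega),
    pv_pad_cell image _ (i + 2) j (by omega) (by omega),
    pv_pad_cell image _ (i + 2) (j + 1) (by omega) (by omega),
    pv_pad_cell image _ (i + 2) (j + 2) (by omega) (by omega)]
  -- evaluate the kernel constants
  simp only [
    show (([[-1, 0, 1], [-2, 0, 2], [-1, 0, 1]] : List (List Int)).getD 0 []).getD 0 0 = (-1 : Int) by decide,
    show (([[-1, 0, 1], [-2, 0, 2], [-1, 0, 1]] : List (List Int)).getD 0 []).getD 1 0 = (0 : Int) by decide,
    show (([[-1, 0, 1], [-2, 0, 2], [-1, 0, 1]] : List (List Int)).getD 0 []).getD 2 0 = (1 : Int) by decide,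
    show (([[-1, 0, 1], [-2, 0, 2], [-1, 0, 1]] : List (List Int)).getD 1 []).getD 0 0 = (-2 : Int) by decide,
    show (([[-1, 0, 1], [-2, 0, 2], [-1, 0, 1]] : List (List Int)).getD 1 []).getD 1 0 = (0 : Int) by decide,
    show (([[-1, 0, 1], [-2, 0, 2], [-1, 0, 1]] : List (List Int)).getD 1 []).getD 2 0 = (2 : Int) by decide,
    show (([[-1, 0, 1], [-2, 0, 2], [-1, 0, 1]] : List (List Int)).getD 2 []).getD 0 0 = (-1 : Int) by decide,
    show (([[-1, 0, 1], [-2, 0, 2], [-1, 0, 1]] : List (List Int)).getD 2 []).getD 1 0 = (0 : Int) by decide,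
    show (([[-1, 0, 1], [-2, 0, 2], [-1, 0, 1]] : List (List Int)).getD 2 []).getD 2 0 = (1 : Int) by decide,
    show (([[-1, -2, -1], [0, 0, 0], [1, 2, 1]] : List (List Int)).getD 0 []).getD 0 0 = (-1 : Int) by decide,
    show (([[-1, -2, -1], [0, 0, 0], [1, 2, 1]] : List (List Int)).getD 0 []).getD 1 0 = (-2 : Int) by decide,
    show (([[-1, -2, -1], [0, 0, 0], [1, 2, 1]] : List (List Int)).getD 0 []).getD 2 0 = (-1 : Int) by decide,
    show (([[-1, -2, -1], [0, 0, 0], [1, 2, 1]] : List (List Int)).getD 1 []).getD 0 0 = (0 : Int) by decide,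
    show (([[-1, -2, -1], [0, 0, 0], [1, 2, 1]] : List (List Int)).getD 1 []).getD 1 0 = (0 : Int) by decide,
    show (([[-1, -2, -1], [0, 0, 0], [1, 2, 1]] : List (List Int)).getD 1 []).getD 2 0 = (0 : Int) by decide,
    show (([[-1, -2, -1], [0, 0, 0], [1, 2, 1]] : List (List Int)).getD 2 []).getD 0 0 = (1 : Int) by decide,
    show (([[-1, -2, -1], [0, 0, 0], [1, 2, 1]] : List (List Int)).getD 2 []).getD 1 0 = (2 : Int) by decide,
    show (([[-1, -2, -1], [0, 0, 0], [1, 2, 1]] : List (List Int)).getD 2 []).getD 2 0 = (1 : Int) by decide]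
  -- replace B's four row reads by pvCell atoms
  have hzero : (List.replicate (((image.headD []).length)) (0 : Int)).getD j 0 = 0 := by
    simp [List.getD_eq_getElem?_getD]
  have hupR : (if 1 ≤ i then
        ((image.map fun row => (List.range ((image.headD []).length)).map fun j' =>
          (if j' + 1 < (image.headD []).length then row.getD (j' + 1) 0 else 0) -
            (if 1 ≤ j' then row.getD (j' - 1) 0 else 0)).getD (i - 1)
          (List.replicate ((image.headD []).length) 0))
      else (List.replicate ((image.headD []).length) 0)).getD j 0 =
      pvCell image ((image.headD []).length) i (j + 2) - pvCell image ((image.headD []).length) i j := by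
    by_cases h1 : 1 ≤ i
    · rw [if_pos h1, pv_rx_cell image _ j (i - 1) hj (by omega),
        Nat.sub_add_cancel h1]
    · rw [if_neg h1, hzero]
      have : i = 0 := by omega
      subst this
      rw [pv_cell_row_zero, pv_cell_row_zero]
      norm_num
  have hdnR : (if i + 1 < image.length then
        ((image.map fun row => (List.range ((image.headD []).length)).map fun j' =>
          (if j' + 1 < (image.headD []).length then row.getD (j' + 1) 0 else 0) -
            (if 1 ≤ j' then row.getD (j' - 1) 0 else 0)).getD (i + 1)
          (List.replicate ((image.headD []).length) 0))
      else (List.replicate ((image.headD []).length) 0)).getD j 0 =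
      pvCell image ((image.headD []).length) (i + 2) (j + 2) -
        pvCell image ((image.headD []).length) (i + 2) j := by
    by_cases h2 : i + 1 < image.length
    · rw [if_pos h2, pv_rx_cell image _ j (i + 1) hj h2]
    · rw [if_neg h2, hzero, pv_cell_row_big _ _ _ _ (by omega),
        pv_cell_row_big _ _ _ _ (by omega)]
      norm_num
  have hmidR := pv_rx_cell image ((image.headD []).length) j i hj hi
  have hupS : (if 1 ≤ i then
        ((image.map fun row => (List.range ((image.headD []).length)).map fun j' =>
          (if 1 ≤ j' then row.getD (j' - 1) 0 else 0) + 2 * row.getD j' 0 +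
            (if j' + 1 < (image.headD []).length then row.getD (j' + 1) 0 else 0)).getD (i - 1)
          (List.replicate ((image.headD []).length) 0))
      else (List.replicate ((image.headD []).length) 0)).getD j 0 =
      pvCell image ((image.headD []).length) i j +
        2 * pvCell image ((image.headD []).length) i (j + 1) +
        pvCell image ((image.headD []).length) i (j + 2) := by
    by_cases h1 : 1 ≤ i
    · rw [if_pos h1, pv_sx_cell image _ j (i - 1) hj (by omega), Nat.sub_add_cancel h1]
    · rw [if_neg h1, hzero]
      have : i = 0 := by omega
      subst this
      rw [pv_cell_row_zero, pv_cell_row_zero, pv_cell_row_zero]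
      norm_num
  have hdnS : (if i + 1 < image.length then
        ((image.map fun row => (List.range ((image.headD []).length)).map fun j' =>
          (if 1 ≤ j' then row.getD (j' - 1) 0 else 0) + 2 * row.getD j' 0 +
            (if j' + 1 < (image.headD []).length then row.getD (j' + 1) 0 else 0)).getD (i + 1)
          (List.replicate ((image.headD []).length) 0))
      else (List.replicate ((image.headD []).length) 0)).getD j 0 =
      pvCell image ((image.headD []).length) (i + 2) j +
        2 * pvCell image ((image.headD []).length) (i + 2) (j + 1) +
        pvCell image ((image.headD []).length) (i + 2) (j + 2) := by
    by_cases h2 : i + 1 < image.length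
    · rw [if_pos h2, pv_sx_cell image _ j (i + 1) hj h2]
    · rw [if_neg h2, hzero, pv_cell_row_big _ _ _ _ (by omega),
        pv_cell_row_big _ _ _ _ (by omega), pv_cell_row_big _ _ _ _ (by omega)]
      norm_num
  rw [hupR, hdnR, hmidR, hupS, hdnS]
  -- both sides are now polynomial in the pvCell atoms; gx and gy coincide, then the shared sqrt/clamp
  have key : ∀ gxA gyA gxB gyB : Int, gxA = gxB → gyA = gyB →
      max 0 (min 255 (Int.ofNat (Nat.sqrt (gxA * gxA + gyA * gyA).toNat))) =
      min 255 (Int.ofNat (Nat.sqrt (gxB * gxB + gyB * gyB).toNat)) := by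
    intro gxA gyA gxB gyB h1 h2
    rw [h1, h2]
    have : (0 : Int) ≤ min 255 (Int.ofNat (Nat.sqrt (gxB * gxB + gyB * gyB).toNat)) :=
      le_min (by norm_num) (Int.natCast_nonneg _)
    omega
  apply key <;> ring

-- ===== VERDICT (by name: the statement is the Claim_ definition above) =====
theorem sobel_filter_python_spec : Claim_equal_sobel_filter_python := by
  intro image _ _
  unfold Spec_sobel_filter_python
  exact pv_ports_eq image
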